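-- pv_equiv track=rewrite | github.com/samuelleyton2006/Entrega-Gramatica-1 | L(G2)/L(G2).py | es_g2
-- ===== SOURCE A (Python) =====
-- def es_g2(s):
--     i = 0
--     n = 0
--     L = len(s)
--     while i < L and s[i] == '0':
--         i += 1
--         n += 1
--     restante = L - i
--     if restante != n + 1:
--         return False
--     for ch in s[i:]:
--         if ch != '1':  # '1' representa 'b'
--             return False
--     return True
-- ===== SOURCE B (Python) =====
-- def es_g2(s):
--     z = s.count('0')
--     o = s.count('1')
--     return o == z + 1 and s == '0' * z + '1' * o
-- ===== Notes on version B (the rewrite author's own statement) =====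
-- stated objective: simpler
-- what changed: Replaces the positional leading-zero scan plus tail loop with counting zeros and ones and a single closed-form equality against the canonical zeros-then-ones string.
import Mathlib
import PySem

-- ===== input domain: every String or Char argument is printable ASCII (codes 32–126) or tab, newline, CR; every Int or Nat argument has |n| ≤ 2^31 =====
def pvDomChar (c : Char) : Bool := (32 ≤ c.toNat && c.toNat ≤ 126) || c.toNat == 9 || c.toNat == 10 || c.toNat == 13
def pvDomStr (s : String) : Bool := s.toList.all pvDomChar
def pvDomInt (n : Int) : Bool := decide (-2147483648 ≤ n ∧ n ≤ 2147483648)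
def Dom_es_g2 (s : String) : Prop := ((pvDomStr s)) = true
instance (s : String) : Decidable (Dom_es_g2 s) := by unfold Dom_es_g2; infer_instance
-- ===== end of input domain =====

-- B checks membership in 0^n 1^(n+1) by character counts and one closed-form string equality instead of A's positional scans (objective: simpler).

-- ===== PORT A =====
-- A's while loop: consume leading '0's, counting them (i and n advance together, so we return the count and the remaining suffix)
def esG2Lead : List Char → Nat × List Char
  | [] => (0, [])
  | c :: cs =>
    if c == '0' then
      let (n, r) := esG2Lead cs
      (n + 1, r)
    else (0, c :: cs)

-- A's for loop over s[i:]
def esG2Tail : List Char → Bool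
  | [] => true
  | c :: cs => if c != '1' then false else esG2Tail cs

def es_g2 (s : String) : Bool :=
  let p := esG2Lead s.toList
  if p.2.length ≠ p.1 + 1 then false
  else esG2Tail p.2

-- ===== PORT B =====
def es_g2_alt (s : String) : Bool :=
  let l := s.toList
  let z := l.count '0'
  let o := l.count '1'
  (o == z + 1) && (l == List.replicate z '0' ++ List.replicate o '1')

-- ===== PRECONDITION & SPEC =====
def Spec_es_g2 (s : String) (out : Bool) : Prop := out = es_g2_alt s
instance (s : String) (out : Bool) : Decidable (Spec_es_g2 s out) := by unfold Spec_es_g2; infer_instance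

-- ===== CLAIM (what is proved, stated in full; the proofs are below) =====
def Claim_equal_es_g2 : Prop := ∀ (s : String), Dom_es_g2 s → Spec_es_g2 s (es_g2 s)

-- ===== LEMMAS AND PROOFS =====

theorem esG2Lead_spec (l : List Char) :
    esG2Lead l = ((l.takeWhile (· == '0')).length, l.dropWhile (· == '0')) := by
  induction l with
  | nil => rfl
  | cons c cs ih =>
    by_cases h : c == '0' <;>
      simp [esG2Lead, List.takeWhile, List.dropWhile, h, ih]

theorem esG2Tail_spec (l : List Char) : esG2Tail l = l.all (· == '1') := by
  induction l with
  | nil => rfl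
  | cons c cs ih =>
    simp only [esG2Tail, List.all_cons, bne]
    by_cases h : c == '1' <;> simp [h, ih]

theorem es_g2_shape (s : String) :
    es_g2 s = true ↔ ∃ n, s.toList = List.replicate n '0' ++ List.replicate (n + 1) '1' := by
  constructor
  · intro h
    simp only [es_g2, esG2Lead_spec] at h
    split at h
    · exact absurd h (by simp)
    · rename_i hlen
      rw [esG2Tail_spec, List.all_eq_true] at h
      set z := (s.toList.takeWhile (· == '0')).length with hz
      refine ⟨z, ?_⟩
      have htw : s.toList.takeWhile (· == '0') = List.replicate z '0' := by
        rw [hz]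
        apply List.eq_replicate_of_mem
        intro c hc
        have := List.mem_takeWhile_imp hc
        simpa using this
      have hdw : s.toList.dropWhile (· == '0') = List.replicate (z + 1) '1' := by
        apply List.eq_replicate_iff.mpr
        constructor
        · omega
        · intro c hc
          have := h c hc
          simpa using this
      conv_lhs => rw [← List.takeWhile_append_dropWhile (p := (· == '0')) (l := s.toList)]
      rw [htw, hdw]
  · rintro ⟨n, hl⟩
    simp only [es_g2, esG2Lead_spec, hl]
    have htw : (List.replicate n '0' ++ List.replicate (n + 1) '1').takeWhile (· == '0')
        = List.replicate n '0' := by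
      rw [List.takeWhile_append]
      simp
    have hdw : (List.replicate n '0' ++ List.replicate (n + 1) '1').dropWhile (· == '0')
        = List.replicate (n + 1) '1' := by
      rw [List.dropWhile_append]
      simp
    rw [htw, hdw]
    simp [esG2Tail_spec]

theorem es_g2_alt_shape (s : String) :
    es_g2_alt s = true ↔ ∃ n, s.toList = List.replicate n '0' ++ List.replicate (n + 1) '1' := by
  constructor
  · intro h
    simp only [es_g2_alt, Bool.and_eq_true, beq_iff_eq] at h
    exact ⟨s.toList.count '0', by rw [← h.1]; exact h.2⟩
  · rintro ⟨n, hl⟩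
    have h0 : s.toList.count '0' = n := by
      rw [hl]; simp [List.count_append, List.count_replicate]
    have h1 : s.toList.count '1' = n + 1 := by
      rw [hl]; simp [List.count_append, List.count_replicate]
    simp only [es_g2_alt, Bool.and_eq_true, beq_iff_eq, h0, h1]
    exact ⟨trivial, hl⟩

-- ===== VERDICT (by name: the statement is the Claim_ definition above) =====
theorem es_g2_spec : Claim_equal_es_g2 := by
  intro s _
  unfold Spec_es_g2
  rw [Bool.eq_iff_iff, es_g2_shape, es_g2_alt_shape]
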